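-- pv_equiv track=rewrite | github.com/neumann-mlucas/code_exercises | rosalind/src/rosalind_lcsm.py | get_identity_matrix
-- ===== SOURCE A (Python) =====
-- def get_identity_matrix(seq1, seq2):
--     # m columns, n lines
--     m, n = len(seq1), len(seq2)
--     # Create identity matrix
--     # ERROR
--     matrix = [[int(i == j) for j in seq2] for i in seq1]
--     # Add values in diagonals
--     for i in range(1, m):
--         for j in range(1, n):
--             temp = matrix[i][j] + matrix[i - 1][j - 1] if matrix[i][j] == 1 else 0
--             matrix[i][j] = temp
--     return matrix
-- ===== SOURCE B (Python) =====
-- def get_identity_matrix(seq1, seq2):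
--     m, n = len(seq1), len(seq2)
--     matrix = [[0] * n for _ in range(m)]
--     starts = [(0, j) for j in range(n)] + [(i, 0) for i in range(1, m)]
--     for i, j in starts:
--         counter = 0
--         while i < m and j < n:
--             counter = counter + 1 if seq1[i] == seq2[j] else 0
--             matrix[i][j] = counter
--             i += 1
--             j += 1
--     return matrix
-- ===== Notes on version B (the rewrite author's own statement) =====
-- stated objective: alternative
-- what changed: B drops A's row-major DP that reads matrix[i-1][j-1] and instead walks each diagonal once (starting from the top row and left column) threading a scalar run-length counter, writing it into a zero-initialized matrix.
import Mathlib
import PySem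

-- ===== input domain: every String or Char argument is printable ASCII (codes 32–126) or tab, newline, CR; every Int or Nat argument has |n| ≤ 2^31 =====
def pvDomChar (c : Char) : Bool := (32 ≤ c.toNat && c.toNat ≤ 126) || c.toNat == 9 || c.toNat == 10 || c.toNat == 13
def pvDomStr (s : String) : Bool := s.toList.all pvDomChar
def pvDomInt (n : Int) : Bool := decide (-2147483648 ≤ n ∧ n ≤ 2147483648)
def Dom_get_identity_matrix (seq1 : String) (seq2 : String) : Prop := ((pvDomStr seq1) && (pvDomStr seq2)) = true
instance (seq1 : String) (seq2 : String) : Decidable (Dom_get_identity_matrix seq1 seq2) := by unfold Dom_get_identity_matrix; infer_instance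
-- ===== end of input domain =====

-- B replaces A's row-major DP (reading matrix[i-1][j-1]) by walking each diagonal once with a
-- scalar run-length counter (objective: alternative decomposition, same asymptotic cost).

-- matrix[i][j] read (indices always in range when used by either port)
def pyGet2 (mat : List (List Int)) (i j : Nat) : Int := (mat.getD i []).getD j 0
-- matrix[i][j] = v write (indices always in range when used by either port)
def pySet2 (mat : List (List Int)) (i j : Nat) (v : Int) : List (List Int) :=
  mat.set i ((mat.getD i []).set j v)

-- ===== PORT A =====
def get_identity_matrix (seq1 : String) (seq2 : String) : List (List Int) :=
  -- matrix = [[int(i == j) for j in seq2] for i in seq1]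
  -- for i in range(1, m): for j in range(1, n): temp = …; matrix[i][j] = temp
  (List.range' 1 (seq1.toList.length - 1)).foldl (fun mat i =>
    (List.range' 1 (seq2.toList.length - 1)).foldl (fun mat j =>
      let temp := if pyGet2 mat i j = 1 then pyGet2 mat i j + pyGet2 mat (i-1) (j-1) else 0
      pySet2 mat i j temp) mat)
    (seq1.toList.map (fun a => seq2.toList.map (fun b => if a = b then (1 : Int) else 0)))

-- ===== PORT B =====
-- the `while i < m and j < n` loop of Source B, threading the run-length counter down the diagonal
def diagWalk (cs1 cs2 : List Char) (i j : Nat) (counter : Int) (mat : List (List Int)) :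
    List (List Int) :=
  if h : i < cs1.length ∧ j < cs2.length then
    let c := if cs1.getD i ' ' = cs2.getD j ' ' then counter + 1 else 0
    diagWalk cs1 cs2 (i+1) (j+1) c (pySet2 mat i j c)
  else mat
termination_by cs1.length - i
decreasing_by omega

def get_identity_matrix_alt (seq1 : String) (seq2 : String) : List (List Int) :=
  -- matrix = [[0]*n for _ in range(m)]; starts = top row ++ left column; walk each diagonal
  (((List.range seq2.toList.length).map (fun j => ((0 : Nat), j))) ++
    ((List.range' 1 (seq1.toList.length - 1)).map (fun i => (i, (0 : Nat))))).foldl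
    (fun mat p => diagWalk seq1.toList seq2.toList p.1 p.2 0 mat)
    (List.replicate seq1.toList.length (List.replicate seq2.toList.length (0 : Int)))

-- ===== PRECONDITION & SPEC =====
def Spec_get_identity_matrix (seq1 : String) (seq2 : String) (out : List (List Int)) : Prop := out = get_identity_matrix_alt seq1 seq2
instance (seq1 : String) (seq2 : String) (out : List (List Int)) : Decidable (Spec_get_identity_matrix seq1 seq2 out) := by unfold Spec_get_identity_matrix; infer_instance

-- ===== CLAIM (what is proved, stated in full; the proofs are below) =====
def Claim_equal_get_identity_matrix : Prop := ∀ (seq1 : String) (seq2 : String), Dom_get_identity_matrix seq1 seq2 → Spec_get_identity_matrix seq1 seq2 (get_identity_matrix seq1 seq2)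

-- ===== LEMMAS AND PROOFS =====

-- the common value of cell (i, j): the diagonal run length ending at (i, j), 0 on a mismatch
def cellG (cs1 cs2 : List Char) : Nat → Nat → Int
  | 0, j => if cs1.getD 0 ' ' = cs2.getD j ' ' then 1 else 0
  | i+1, 0 => if cs1.getD (i+1) ' ' = cs2.getD 0 ' ' then 1 else 0
  | i+1, j+1 => if cs1.getD (i+1) ' ' = cs2.getD (j+1) ' ' then cellG cs1 cs2 i j + 1 else 0

-- an m×n matrix whose entries are given by a function
def mkMat (m n : Nat) (f : Nat → Nat → Int) : List (List Int) :=
  (List.range m).map (fun i => (List.range n).map (fun j => f i j))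

theorem mkMat_congr {m n : Nat} {f g : Nat → Nat → Int}
    (h : ∀ a < m, ∀ b < n, f a b = g a b) : mkMat m n f = mkMat m n g := by
  unfold mkMat
  refine List.map_congr_left (fun a ha => ?_)
  exact List.map_congr_left (fun b hb => h a (List.mem_range.1 ha) b (List.mem_range.1 hb))

theorem pyGet2_mkMat {m n : Nat} {f : Nat → Nat → Int} {i j : Nat}
    (hi : i < m) (hj : j < n) : pyGet2 (mkMat m n f) i j = f i j := by
  simp [pyGet2, mkMat, List.getD_eq_getElem?_getD, hi, hj]

theorem pySet2_mkMat {m n : Nat} {f : Nat → Nat → Int} {i j : Nat} {v : Int}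
    (hi : i < m) (_hj : j < n) :
    pySet2 (mkMat m n f) i j v = mkMat m n (fun a b => if a = i ∧ b = j then v else f a b) := by
  apply List.ext_getElem
  · simp [pySet2, mkMat]
  · intro a ha _
    simp only [pySet2, mkMat, List.getElem_set, List.getD_eq_getElem?_getD, List.getElem?_map,
      List.getElem?_range, hi]
    by_cases hai : i = a
    · subst hai
      simp only []
      apply List.ext_getElem
      · simp
      · intro b hb _
        simp only [List.getElem_map, List.getElem_range]
        by_cases hbj : j = b
        · subst hbj; simp
        · simp [hbj]
          exact fun h => (hbj h.symm).elim
    · simp only [if_neg hai, List.getElem_map, List.getElem_range]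
      refine List.map_congr_left (fun b _ => ?_)
      exact (if_neg (fun h => hai h.1.symm)).symm

theorem cellG_succ (cs1 cs2 : List Char) {i j : Nat} (hi : 1 ≤ i) (hj : 1 ≤ j) :
    cellG cs1 cs2 i j =
      if cs1.getD i ' ' = cs2.getD j ' ' then cellG cs1 cs2 (i-1) (j-1) + 1 else 0 := by
  cases i with
  | zero => omega
  | succ i => cases j with
    | zero => omega
    | succ j => rfl

theorem cellG_edge (cs1 cs2 : List Char) {i j : Nat} (h : i = 0 ∨ j = 0) :
    cellG cs1 cs2 i j = if cs1.getD i ' ' = cs2.getD j ' ' then 1 else 0 := by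
  cases i with
  | zero => rfl
  | succ i => cases j with
    | zero => rfl
    | succ j => omega

-- state of A's matrix after rows 1..k have been fully processed
def fStage (cs1 cs2 : List Char) (k a b : Nat) : Int :=
  if 1 ≤ a ∧ a ≤ k ∧ 1 ≤ b then cellG cs1 cs2 a b
  else if cs1.getD a ' ' = cs2.getD b ' ' then 1 else 0

theorem fStage_diag (cs1 cs2 : List Char) {k a b : Nat} (h : a ≤ k) :
    fStage cs1 cs2 k a b = cellG cs1 cs2 a b := by
  by_cases h1 : 1 ≤ a ∧ a ≤ k ∧ 1 ≤ b
  · rw [fStage, if_pos h1]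
  · rw [fStage, if_neg h1, cellG_edge cs1 cs2 (by omega)]

-- state of A's matrix while processing row i, columns 1..J done
def fRow (cs1 cs2 : List Char) (i J a b : Nat) : Int :=
  if a = i ∧ 1 ≤ b ∧ b ≤ J then cellG cs1 cs2 a b else fStage cs1 cs2 (i-1) a b

theorem cellG_from_prev (cs1 cs2 : List Char) (i j : Nat) (c : Int)
    (hc : c = (if i = 0 ∨ j = 0 then 0 else cellG cs1 cs2 (i-1) (j-1))) :
    (if cs1.getD i ' ' = cs2.getD j ' ' then c + 1 else 0) = cellG cs1 cs2 i j := by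
  match i, j with
  | 0, j => simp only [true_or, if_pos] at hc; subst hc; rw [cellG_edge cs1 cs2 (Or.inl rfl)]; simp
  | i+1, 0 => simp only [or_true, if_pos] at hc; subst hc; rw [cellG_edge cs1 cs2 (Or.inr rfl)]; simp
  | i+1, j+1 =>
    simp only [Nat.succ_ne_zero, or_self, if_false, Nat.add_sub_cancel] at hc
    subst hc; rfl

theorem walk_spec (cs1 cs2 : List Char) :
    ∀ (k i j : Nat) (f : Nat → Nat → Int) (c : Int), cs1.length - i ≤ k →
    c = (if i = 0 ∨ j = 0 then 0 else cellG cs1 cs2 (i-1) (j-1)) →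
    diagWalk cs1 cs2 i j c (mkMat cs1.length cs2.length f) =
      mkMat cs1.length cs2.length
        (fun a b => if i ≤ a ∧ j ≤ b ∧ a - i = b - j then cellG cs1 cs2 a b else f a b) := by
  intro k
  induction k with
  | zero =>
    intro i j f c hk hc
    rw [diagWalk, dif_neg (by omega)]
    exact mkMat_congr (fun a ha b hb => (if_neg (by omega)).symm)
  | succ k ih =>
    intro i j f c hk hc
    by_cases h : i < cs1.length ∧ j < cs2.length
    · rw [diagWalk, dif_pos h]
      simp only [cellG_from_prev cs1 cs2 i j c hc, pySet2_mkMat h.1 h.2]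
      rw [ih (i+1) (j+1) _ _ (by omega) (by simp)]
      apply mkMat_congr
      intro a ha b hb
      by_cases h1 : i + 1 ≤ a ∧ j + 1 ≤ b ∧ a - (i+1) = b - (j+1)
      · rw [if_pos h1, if_pos (by omega)]
      · rw [if_neg h1]
        by_cases h2 : a = i ∧ b = j
        · obtain ⟨rfl, rfl⟩ := h2
          rw [if_pos (by simp), if_pos (by omega)]
        · rw [if_neg h2, if_neg (by omega)]
    · rw [diagWalk, dif_neg h]
      exact mkMat_congr (fun a ha b hb => (if_neg (by omega)).symm)

theorem temp_eq (cs1 cs2 : List Char) {i j : Nat} (hi : 1 ≤ i) (hj : 1 ≤ j) :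
    (if (if cs1.getD i ' ' = cs2.getD j ' ' then (1:Int) else 0) = 1
      then (if cs1.getD i ' ' = cs2.getD j ' ' then (1:Int) else 0) + cellG cs1 cs2 (i-1) (j-1)
      else 0) = cellG cs1 cs2 i j := by
  rw [cellG_succ cs1 cs2 hi hj]
  by_cases hm : cs1.getD i ' ' = cs2.getD j ' '
  · simp only [if_pos hm]
    norm_num [add_comm]
  · simp only [if_neg hm]
    norm_num

theorem inner_spec (cs1 cs2 : List Char) (i : Nat) (hi : 1 ≤ i) (him : i < cs1.length) :
    ∀ J, J ≤ cs2.length - 1 →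
    (List.range' 1 J).foldl (fun mat j =>
      pySet2 mat i j (if pyGet2 mat i j = 1 then pyGet2 mat i j + pyGet2 mat (i-1) (j-1) else 0))
      (mkMat cs1.length cs2.length (fRow cs1 cs2 i 0)) =
      mkMat cs1.length cs2.length (fRow cs1 cs2 i J) := by
  intro J
  induction J with
  | zero => intro _; rfl
  | succ J ih =>
    intro hJ
    have hjn : 1 + J < cs2.length := by omega
    rw [List.range'_concat, List.foldl_append, ih (by omega)]
    simp only [List.foldl_cons, List.foldl_nil, one_mul]
    simp only [pyGet2_mkMat him hjn,
      pyGet2_mkMat (show i - 1 < cs1.length by omega) (show 1 + J - 1 < cs2.length by omega)]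
    have e1 : fRow cs1 cs2 i J i (1+J) =
        (if cs1.getD i ' ' = cs2.getD (1+J) ' ' then (1:Int) else 0) := by
      rw [fRow, if_neg (by omega), fStage, if_neg (by omega)]
    have e2 : fRow cs1 cs2 i J (i-1) (1+J-1) = cellG cs1 cs2 (i-1) (1+J-1) := by
      rw [fRow, if_neg (by omega)]
      exact fStage_diag cs1 cs2 (by omega)
    rw [e1, e2, temp_eq cs1 cs2 hi (by omega), pySet2_mkMat him hjn]
    apply mkMat_congr
    intro a ha b hb
    by_cases hab : a = i ∧ b = 1 + J
    · rw [if_pos hab]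
      obtain ⟨rfl, rfl⟩ := hab
      rw [fRow, if_pos ⟨rfl, by omega, by omega⟩]
    · rw [if_neg hab, fRow, fRow]
      by_cases hcond : a = i ∧ 1 ≤ b ∧ b ≤ J
      · rw [if_pos hcond, if_pos (by omega)]
      · rw [if_neg hcond, if_neg (by omega)]

theorem outer_spec (cs1 cs2 : List Char) :
    ∀ K, K ≤ cs1.length - 1 →
    (List.range' 1 K).foldl (fun mat i =>
      (List.range' 1 (cs2.length - 1)).foldl (fun mat j =>
        let temp := if pyGet2 mat i j = 1 then pyGet2 mat i j + pyGet2 mat (i-1) (j-1) else 0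
        pySet2 mat i j temp) mat) (mkMat cs1.length cs2.length (fStage cs1 cs2 0)) =
      mkMat cs1.length cs2.length (fStage cs1 cs2 K) := by
  intro K
  induction K with
  | zero => intro _; rfl
  | succ K ih =>
    intro hK
    rw [List.range'_concat, List.foldl_append, ih (by omega)]
    simp only [List.foldl_cons, List.foldl_nil, one_mul]
    have hstart : mkMat cs1.length cs2.length (fStage cs1 cs2 K) =
        mkMat cs1.length cs2.length (fRow cs1 cs2 (1+K) 0) := by
      apply mkMat_congr
      intro a ha b hb
      rw [fRow, if_neg (by omega), show 1 + K - 1 = K from by omega]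
    rw [hstart, inner_spec cs1 cs2 (1+K) (by omega) (by omega) (cs2.length - 1) (le_refl _)]
    apply mkMat_congr
    intro a ha b hb
    simp only [fRow, fStage, show 1 + K - 1 = K from by omega]
    split_ifs <;> first | rfl | omega

theorem init_eq (cs1 cs2 : List Char) :
    cs1.map (fun a => cs2.map (fun b => if a = b then (1:Int) else 0)) =
    mkMat cs1.length cs2.length (fStage cs1 cs2 0) := by
  apply List.ext_getElem
  · simp [mkMat]
  · intro a ha hha
    have ha' : a < cs1.length := by simpa using ha
    simp only [List.getElem_map, mkMat, List.getElem_range]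
    apply List.ext_getElem
    · simp
    · intro b hb hhb
      have hb' : b < cs2.length := by simpa using hb
      simp only [List.getElem_map, List.getElem_range, fStage]
      rw [if_neg (show ¬(1 ≤ a ∧ a ≤ 0 ∧ 1 ≤ b) from by omega),
        List.getD_eq_getElem cs1 _ ha', List.getD_eq_getElem cs2 _ hb']

theorem portA_eq (seq1 seq2 : String) :
    get_identity_matrix seq1 seq2 =
      mkMat seq1.toList.length seq2.toList.length (cellG seq1.toList seq2.toList) := by
  unfold get_identity_matrix
  rw [init_eq, outer_spec seq1.toList seq2.toList (seq1.toList.length - 1) (le_refl _)]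
  exact mkMat_congr fun a ha b hb => fStage_diag seq1.toList seq2.toList (by omega)

theorem starts_fold (cs1 cs2 : List Char) :
    ∀ (ps : List (Nat × Nat)) (f : Nat → Nat → Int), (∀ p ∈ ps, p.1 = 0 ∨ p.2 = 0) →
    ps.foldl (fun mat p => diagWalk cs1 cs2 p.1 p.2 0 mat) (mkMat cs1.length cs2.length f) =
      mkMat cs1.length cs2.length
        (fun a b => if ps.any (fun p => decide (p.1 ≤ a ∧ p.2 ≤ b ∧ a - p.1 = b - p.2))
          then cellG cs1 cs2 a b else f a b) := by
  intro ps
  induction ps with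
  | nil =>
    intro f _
    exact (mkMat_congr fun a ha b hb => by simp).symm
  | cons p ps ihp =>
    intro f hps
    simp only [List.foldl_cons]
    rw [walk_spec cs1 cs2 cs1.length p.1 p.2 f 0 (by omega)
      (by rw [if_pos (hps p List.mem_cons_self)])]
    rw [ihp _ (fun q hq => hps q (List.mem_cons_of_mem _ hq))]
    apply mkMat_congr
    intro a ha b hb
    simp only [List.any_cons]
    by_cases hcov : ps.any (fun q => decide (q.1 ≤ a ∧ q.2 ≤ b ∧ a - q.1 = b - q.2)) = true
    · rw [if_pos hcov, if_pos (Bool.or_eq_true _ _ ▸ Or.inr hcov : _ = true)]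
    · rw [if_neg hcov]
      by_cases hp : p.1 ≤ a ∧ p.2 ≤ b ∧ a - p.1 = b - p.2
      · rw [if_pos hp, if_pos (Bool.or_eq_true _ _ ▸ Or.inl (decide_eq_true hp) : _ = true)]
      · rw [if_neg hp, if_neg (fun h => by
          rw [Bool.or_eq_true] at h
          exact h.elim (fun h1 => hp (of_decide_eq_true h1)) hcov)]

theorem portB_eq (seq1 seq2 : String) :
    get_identity_matrix_alt seq1 seq2 =
      mkMat seq1.toList.length seq2.toList.length (cellG seq1.toList seq2.toList) := by
  unfold get_identity_matrix_alt
  have hrep : List.replicate seq1.toList.length (List.replicate seq2.toList.length (0:Int)) =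
      mkMat seq1.toList.length seq2.toList.length (fun _ _ => 0) := by
    apply List.ext_getElem
    · simp [mkMat]
    · intro a ha hha
      simp [mkMat, List.map_const']
  rw [hrep, starts_fold seq1.toList seq2.toList _ _ ?hedge]
  case hedge =>
    intro p hp
    rcases List.mem_append.1 hp with h | h
    · obtain ⟨j, _, rfl⟩ := List.mem_map.1 h
      exact Or.inl rfl
    · obtain ⟨i, _, rfl⟩ := List.mem_map.1 h
      exact Or.inr rfl
  apply mkMat_congr
  intro a ha b hb
  rw [if_pos ?hcov]
  case hcov =>
    rw [List.any_eq_true]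
    rcases Nat.lt_or_ge b a with hab | hab
    · exact ⟨(a - b, 0), List.mem_append.2 (Or.inr (List.mem_map.2
        ⟨a - b, List.mem_range'_1.2 (by omega), rfl⟩)), by simp; omega⟩
    · exact ⟨(0, b - a), List.mem_append.2 (Or.inl (List.mem_map.2
        ⟨b - a, List.mem_range.2 (by omega), rfl⟩)), by simp; omega⟩

-- ===== VERDICT (by name: the statement is the Claim_ definition above) =====
theorem get_identity_matrix_spec : Claim_equal_get_identity_matrix := by
  intro seq1 seq2 _
  unfold Spec_get_identity_matrix
  rw [portA_eq, portB_eq]
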